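-- pv_equiv track=rewrite | github.com/RZeni/PiMC | server/MusicService.py | parse_voice_command
-- ===== SOURCE A (Python) =====
-- def parse_voice_command(voice_command):
--     """
--     :Author: Brandon Sheppard
--     :param voice_command:
--     :return: string "song title" or "song title, author"
--     """
--     command_split = voice_command.split(" ")
--     song_title = ""
--     artist = ""
--     split_length = len(command_split)
--     for i in range(1, split_length):
--         if (not command_split[i] == "by"):
--             song_title += command_split[i] + " "
--         else:
--             while (i < split_length - 1):
--                 i += 1
--                 artist += command_split[i] + " "
--             break
--
--     if (artist == ""):
--         return (song_title.strip())
--     else: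
--         return (song_title.strip() + " + " + artist.strip())
-- ===== SOURCE B (Python) =====
-- def parse_voice_command(voice_command):
--     """Find-the-split-point-then-slice reformulation: locate 'by', join slices."""
--     words = voice_command.split(" ")[1:]
--     if "by" in words:
--         idx = words.index("by")
--         title = " ".join(words[:idx])
--         if idx < len(words) - 1:
--             return title.strip() + " + " + " ".join(words[idx + 1:]).strip()
--         return title.strip()
--     return " ".join(words).strip()
-- ===== Notes on version B (the rewrite author's own statement) =====
-- stated objective: simpler
-- what changed: A's stateful accumulate-words-until-the-separator loop with a nested index-advancing while is replaced by a find-split-point-then-slice decomposition: split, locate the separator word with list.index, join the two slices, and branch on the positional flag idx < len(words)-1.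
import Mathlib
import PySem

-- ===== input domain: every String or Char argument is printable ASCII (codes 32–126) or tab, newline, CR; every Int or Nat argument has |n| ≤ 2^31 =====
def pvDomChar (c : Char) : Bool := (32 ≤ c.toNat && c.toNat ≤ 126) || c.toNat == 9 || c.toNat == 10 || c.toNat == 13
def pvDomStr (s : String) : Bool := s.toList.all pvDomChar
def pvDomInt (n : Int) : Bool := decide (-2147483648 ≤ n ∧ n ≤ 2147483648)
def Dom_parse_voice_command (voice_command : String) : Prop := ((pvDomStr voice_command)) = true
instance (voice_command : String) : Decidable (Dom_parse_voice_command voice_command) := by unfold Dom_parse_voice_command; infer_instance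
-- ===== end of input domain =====

-- B replaces A's accumulate-until-'by' loop with nested while by a find-split-point-then-slice
-- decomposition (index of 'by', join the two slices); objective: simpler.

-- ===== PORT A =====
-- inner loop: 'while (i < split_length - 1): i += 1; artist += command_split[i] + " "'
-- (cs.getD (i+1) "" is exact here: the loop only reads indices < cs.length)
def pvWhileA (cs : List String) (n i : Nat) (artist : String) : String :=
  if i < n - 1 then pvWhileA cs n (i + 1) (artist ++ cs.getD (i + 1) "" ++ " ") else artist
  termination_by n - 1 - i
  decreasing_by omega

-- 'for i in range(1, split_length)' with the break; cs.getD i "" is exact: i < cs.length at each read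
def pvForA (cs : List String) (n i : Nat) (title artist : String) : String × String :=
  if i < n then
    if (cs.getD i "" == "by") = false then
      pvForA cs n (i + 1) (title ++ cs.getD i "" ++ " ") artist
    else (title, pvWhileA cs n i artist)
  else (title, artist)
  termination_by n - i
  decreasing_by omega

def parse_voice_command (voice_command : String) : String :=
  let command_split := (PySem.Str.split? voice_command " ").getD []  -- sep = " " ≠ "", so split? = some: exact
  let r := pvForA command_split command_split.length 1 "" ""
  if r.2 == "" then PySem.Str.strip r.1
  else PySem.Str.strip r.1 ++ " + " ++ PySem.Str.strip r.2

-- ===== PORT B =====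
def parse_voice_command_alt (voice_command : String) : String :=
  let words := PySem.List.slice ((PySem.Str.split? voice_command " ").getD []) (some 1) none
  match PySem.List.index? words "by" with   -- '"by" in words' + 'words.index("by")'
  | some idx =>
      let title := PySem.Str.join " " (PySem.List.slice words none (some (idx : Int)))
      if (idx : Int) < (words.length : Int) - 1 then
        PySem.Str.strip title ++ " + " ++
          PySem.Str.strip (PySem.Str.join " " (PySem.List.slice words (some ((idx : Int) + 1)) none))
      else PySem.Str.strip title
  | none => PySem.Str.strip (PySem.Str.join " " words)

-- ===== PRECONDITION & SPEC =====
def Spec_parse_voice_command (voice_command : String) (out : String) : Prop := out = parse_voice_command_alt voice_command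
instance (voice_command : String) (out : String) : Decidable (Spec_parse_voice_command voice_command out) := by unfold Spec_parse_voice_command; infer_instance

-- ===== CLAIM (what is proved, stated in full; the proofs are below) =====
def Claim_equal_parse_voice_command : Prop := ∀ (voice_command : String), Dom_parse_voice_command voice_command → Spec_parse_voice_command voice_command (parse_voice_command voice_command)

-- ===== LEMMAS AND PROOFS =====

-- 'title/artist += w + " "' over a word list, as a fold
def pvConcat (ws : List String) (t : String) : String :=
  ws.foldl (fun s w => s ++ w ++ " ") t

-- what A's for-loop computes on the word list it scans
def pvSpecFor : List String → String → String × String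
  | [], t => (t, "")
  | w :: rest, t =>
      if (w == "by") = false then pvSpecFor rest (t ++ w ++ " ")
      else (t, pvConcat rest "")

theorem pvWhileA_eq (cs : List String) (i : Nat) (a : String) :
    pvWhileA cs cs.length i a = pvConcat (cs.drop (i + 1)) a := by
  by_cases h : i < cs.length - 1
  · rw [pvWhileA, if_pos h, pvWhileA_eq cs (i + 1)]
    have hlt : i + 1 < cs.length := by omega
    have hg : cs.getD (i + 1) "" = cs[i + 1] := by
      simp [List.getD_eq_getElem?_getD, List.getElem?_eq_getElem hlt]
    rw [hg]
    conv_rhs => rw [List.drop_eq_getElem_cons hlt]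
    rfl
  · rw [pvWhileA, if_neg h]
    rw [List.drop_eq_nil_of_le (by omega)]
    rfl
  termination_by cs.length - 1 - i
  decreasing_by omega

theorem pvForA_eq (cs : List String) (i : Nat) (t : String) :
    pvForA cs cs.length i t "" = pvSpecFor (cs.drop i) t := by
  by_cases h : i < cs.length
  · rw [pvForA, if_pos h]
    rw [List.drop_eq_getElem_cons h]
    have hg : cs.getD i "" = cs[i] := by
      simp [List.getD_eq_getElem?_getD, List.getElem?_eq_getElem h]
    by_cases hby : (cs[i] == "by") = false
    · rw [hg, if_pos hby, pvForA_eq cs (i + 1)]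
      simp [pvSpecFor, hby]
    · rw [hg, if_neg hby]
      have hby' : (cs[i] == "by") = true := by simpa using hby
      simp only [pvSpecFor, hby', Bool.true_eq_false, if_false]
      rw [pvWhileA_eq]
  · rw [pvForA, if_neg h]
    rw [List.drop_eq_nil_of_le (by omega)]
    rfl
  termination_by cs.length - i
  decreasing_by omega

theorem pvConcat_hom (ws : List String) (t : String) :
    pvConcat ws t = t ++ pvConcat ws "" := by
  induction ws generalizing t with
  | nil => simp [pvConcat]
  | cons w rest ih =>
      simp only [pvConcat, List.foldl_cons] at *
      rw [ih (t ++ w ++ " "), ih ("" ++ w ++ " ")]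
      simp [String.append_assoc]

theorem pvJoin_cons_cons (w q : String) (rest : List String) :
    PySem.Str.join " " (w :: q :: rest) = w ++ " " ++ PySem.Str.join " " (q :: rest) := by
  apply String.toList_inj.mp
  simp [PySem.Str.toList_join, PySem.Chars.join_cons_cons]

theorem pvJoin_singleton (w : String) : PySem.Str.join " " [w] = w := by
  apply String.toList_inj.mp
  simp [PySem.Str.toList_join, PySem.Chars.join, List.intercalate]

theorem pvConcat_eq_join (ws : List String) (h : ws ≠ []) :
    pvConcat ws "" = PySem.Str.join " " ws ++ " " := by
  induction ws with
  | nil => exact absurd rfl h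
  | cons w rest ih =>
      cases rest with
      | nil => simp [pvConcat, pvJoin_singleton]
      | cons q rs =>
          have h1 : pvConcat (w :: q :: rs) "" = pvConcat (q :: rs) ("" ++ w ++ " ") := rfl
          rw [h1, pvConcat_hom, ih (by simp), pvJoin_cons_cons]
          simp [String.append_assoc]

theorem pvChars_rstrip_space (l : List Char) :
    PySem.Chars.rstrip (l ++ [' ']) = PySem.Chars.rstrip l := by
  simp [PySem.Chars.rstrip, List.reverse_append,
    show PySem.Chars.isspace ' ' = true from rfl]

theorem pvStrip_space (s : String) :
    PySem.Str.strip (s ++ " ") = PySem.Str.strip s := by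
  apply String.toList_inj.mp
  rw [PySem.Str.toList_strip, PySem.Str.toList_strip, String.toList_append]
  show PySem.Chars.strip (s.toList ++ [' ']) = PySem.Chars.strip s.toList
  unfold PySem.Chars.strip PySem.Chars.lstrip
  rw [List.dropWhile_append]
  by_cases h : (List.dropWhile PySem.Chars.isspace s.toList).isEmpty = true
  · rw [if_pos h]
    rw [List.isEmpty_iff] at h
    rw [h]
    simp [show PySem.Chars.isspace ' ' = true from rfl, PySem.Chars.rstrip]
  · rw [if_neg h, pvChars_rstrip_space]

theorem pvStrip_concat (ws : List String) :
    PySem.Str.strip (pvConcat ws "") = PySem.Str.strip (PySem.Str.join " " ws) := by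
  cases h : ws with
  | nil =>
      apply String.toList_inj.mp
      simp [pvConcat, PySem.Str.toList_strip, PySem.Str.toList_join, PySem.Chars.join,
        List.intercalate]
  | cons w rest => rw [pvConcat_eq_join _ (by simp), pvStrip_space]

theorem pvConcat_ne_empty (ws : List String) (h : ws ≠ []) :
    (pvConcat ws "" == "") = false := by
  rw [pvConcat_eq_join ws h]
  apply Bool.eq_false_iff.mpr
  intro hc
  have := congrArg String.toList (eq_of_beq hc)
  simp [String.toList_append] at this

theorem pvSpecFor_no_by (ws : List String) (t : String) (h : "by" ∉ ws) :
    pvSpecFor ws t = (pvConcat ws t, "") := by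
  induction ws generalizing t with
  | nil => rfl
  | cons w rest ih =>
      have h1 : w ≠ "by" := by intro e; exact h (by simp [e])
      have h2 : "by" ∉ rest := fun m => h (List.mem_cons_of_mem _ m)
      have hw : (w == "by") = false := beq_eq_false_iff_ne.mpr h1
      simp only [pvSpecFor, hw, if_true]
      rw [ih _ h2]
      simp [pvConcat]

theorem pvSpecFor_split (pre suf : List String) (t : String) (h : "by" ∉ pre) :
    pvSpecFor (pre ++ "by" :: suf) t = (pvConcat pre t, pvConcat suf "") := by
  induction pre generalizing t with
  | nil => simp [pvSpecFor, pvConcat]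
  | cons w rest ih =>
      have h1 : w ≠ "by" := by intro e; exact h (by simp [e])
      have h2 : "by" ∉ rest := fun m => h (List.mem_cons_of_mem _ m)
      have hw : (w == "by") = false := beq_eq_false_iff_ne.mpr h1
      simp only [List.cons_append, pvSpecFor, hw, if_true]
      rw [ih _ h2]
      simp [pvConcat]

-- ===== VERDICT (by name: the statement is the Claim_ definition above) =====
theorem parse_voice_command_spec : Claim_equal_parse_voice_command := by
  intro vc _
  show parse_voice_command vc = parse_voice_command_alt vc
  unfold parse_voice_command parse_voice_command_alt
  dsimp only
  set cs : List String := (PySem.Str.split? vc " ").getD [] with hcs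
  rw [PySem.List.slice_from_one]
  have htail : cs.tail = cs.drop 1 := by cases cs <;> rfl
  rw [htail, pvForA_eq cs 1 ""]
  cases hidx : PySem.List.index? (cs.drop 1) "by" with
  | none =>
      have hmem : "by" ∉ cs.drop 1 := (PySem.List.index?_eq_none_iff _ _).mp hidx
      rw [pvSpecFor_no_by _ _ hmem]
      dsimp only
      rw [if_pos (show (("" : String) == "") = true from rfl)]
      exact pvStrip_concat _
  | some idx =>
      obtain ⟨pre, suf, hsplit, hlen, hpre⟩ := (PySem.List.index?_eq_some_iff _ _ _).mp hidx
      rw [hsplit, pvSpecFor_split _ _ _ hpre]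
      dsimp only
      have htake : (pre ++ "by" :: suf).take idx = pre := by
        rw [← hlen, List.take_left]
      have hdrop : (pre ++ "by" :: suf).drop (idx + 1) = suf := by
        have h2 : pre ++ "by" :: suf = (pre ++ ["by"]) ++ suf := by simp
        rw [h2, ← show (pre ++ ["by"]).length = idx + 1 by simp [hlen], List.drop_left]
      rw [PySem.List.slice_to_natCast, htake]
      cases suf with
      | nil =>
          have hlt : ¬ ((idx : Int) < ((pre ++ "by" :: ([] : List String)).length : Int) - 1) := by
            simp [hlen.symm]
          rw [if_neg hlt, show pvConcat ([] : List String) "" = "" from rfl]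
          rw [if_pos (show (("" : String) == "") = true from rfl)]
          exact pvStrip_concat pre
      | cons s ss =>
          rw [pvConcat_ne_empty (s :: ss) (by simp)]
          have hlt : (idx : Int) < ((pre ++ "by" :: s :: ss : List String).length : Int) - 1 := by
            simp only [List.length_append, List.length_cons, ← hlen]
            push_cast
            omega
          rw [if_pos hlt]
          simp only [Bool.false_eq_true, if_false]
          rw [show ((idx : Int) + 1) = ((idx + 1 : Nat) : Int) by push_cast; ring,
              PySem.List.slice_from_natCast, hdrop]
          rw [pvStrip_concat pre, pvStrip_concat (s :: ss)]
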